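-- pv_equiv track=rewrite | github.com/tdengg/pylastic | .local/lib/python2.7/site-packages/pylastic/prettyPrint.py | printListAsMatrix
-- ===== SOURCE A (Python) =====
-- def printListAsMatrix(lst, flp):
--     prettyMatrix = ''
--     i=1
--     for element in lst:
--         prettyMatrix = prettyMatrix + "{:10d}".format(element)
--         if i%3==0: prettyMatrix = prettyMatrix + '\n'
--         i+=1
--     return prettyMatrix
-- ===== SOURCE B (Python) =====
-- def printListAsMatrix(lst, flp):
--     rows = []
--     for i in range(0, len(lst), 3):
--         chunk = lst[i:i+3]
--         row = ''.join('{:10d}'.format(x) for x in chunk)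
--         if len(chunk) == 3:
--             row += '\n'
--         rows.append(row)
--     return ''.join(rows)
-- ===== Notes on version B (the rewrite author's own statement) =====
-- stated objective: simpler
-- what changed: B builds the output row by row (chunks of 3 via slicing, newline appended iff the chunk is full) instead of A's single flat loop with a 1-based modulo counter.
import Mathlib
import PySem

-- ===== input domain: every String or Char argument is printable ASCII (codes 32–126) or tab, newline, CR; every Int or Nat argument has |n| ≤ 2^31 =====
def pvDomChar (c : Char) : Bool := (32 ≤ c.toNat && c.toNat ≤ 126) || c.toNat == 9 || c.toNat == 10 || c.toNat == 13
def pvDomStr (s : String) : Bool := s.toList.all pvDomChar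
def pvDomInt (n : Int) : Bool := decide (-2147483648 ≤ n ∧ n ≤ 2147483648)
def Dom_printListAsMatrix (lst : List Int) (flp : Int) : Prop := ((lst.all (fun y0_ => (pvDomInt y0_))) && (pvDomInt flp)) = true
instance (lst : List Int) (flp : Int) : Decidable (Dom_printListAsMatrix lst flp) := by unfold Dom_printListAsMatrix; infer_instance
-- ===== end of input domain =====

-- B rebuilds the string by rows (chunks of 3, newline after a full chunk) instead of A's
-- single flat loop with a modulo counter; objective: simpler decomposition, same cost.

-- '{:10d}'.format(n): right-align str(n) in a field of width 10, space padding (exact for ints)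
def pvFmt10 (n : Int) : String :=
  let s := PySem.Int.toStr n
  String.ofList (List.replicate (10 - s.toList.length) ' ') ++ s

-- ===== PORT A =====
def printListAsMatrix (lst : List Int) (flp : Int) : String :=
  (lst.foldl (fun (acc : String × Int) element =>
      let pm := acc.1 ++ pvFmt10 element
      let pm := if PySem.Int.mod acc.2 3 == 0 then pm ++ "\n" else pm
      (pm, acc.2 + 1)) ("", (1 : Int))).1

-- ===== PORT B =====
-- Source B's chunk loop: each iteration consumes lst[i:i+3]; newline appended iff the chunk is full
def pvRows (lst : List Int) : String :=
  match lst with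
  | [] => ""
  | [a] => pvFmt10 a
  | [a, b] => pvFmt10 a ++ pvFmt10 b
  | a :: b :: c :: rest => pvFmt10 a ++ pvFmt10 b ++ pvFmt10 c ++ "\n" ++ pvRows rest

def printListAsMatrix_alt (lst : List Int) (flp : Int) : String := pvRows lst

-- ===== PRECONDITION & SPEC =====
def Spec_printListAsMatrix (lst : List Int) (flp : Int) (out : String) : Prop := out = printListAsMatrix_alt lst flp
instance (lst : List Int) (flp : Int) (out : String) : Decidable (Spec_printListAsMatrix lst flp out) := by unfold Spec_printListAsMatrix; infer_instance

-- ===== CLAIM (what is proved, stated in full; the proofs are below) =====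
def Claim_equal_printListAsMatrix : Prop := ∀ (lst : List Int) (flp : Int), Dom_printListAsMatrix lst flp → Spec_printListAsMatrix lst flp (printListAsMatrix lst flp)

-- ===== LEMMAS AND PROOFS =====

theorem pvMod3_facts (i : Int) (h : PySem.Int.mod i 3 = 1) :
    (PySem.Int.mod i 3 == 0) = false ∧ (PySem.Int.mod (i+1) 3 == 0) = false ∧
    (PySem.Int.mod (i+2) 3 == 0) = true ∧ PySem.Int.mod (i+3) 3 = 1 := by
  rw [PySem.Int.mod_eq_emod_of_pos (by norm_num)] at h
  refine ⟨?_, ?_, ?_, ?_⟩ <;>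
    rw [PySem.Int.mod_eq_emod_of_pos (by norm_num)] <;>
    (try simp only [beq_eq_false_iff_ne, ne_eq, beq_iff_eq]) <;> omega

theorem pvFold_rows (lst : List Int) : ∀ (acc : String) (i : Int), PySem.Int.mod i 3 = 1 →
    (lst.foldl (fun (acc : String × Int) element =>
      let pm := acc.1 ++ pvFmt10 element
      let pm := if PySem.Int.mod acc.2 3 == 0 then pm ++ "\n" else pm
      (pm, acc.2 + 1)) (acc, i)).1 = acc ++ pvRows lst := by
  induction lst using pvRows.induct with
  | case1 => intro acc i _; show acc = acc ++ pvRows []; rw [pvRows]; exact String.append_empty.symm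
  | case2 a =>
    intro acc i hi
    obtain ⟨h0, h1, h2, h3⟩ := pvMod3_facts i hi
    simp only [List.foldl, h0, Bool.false_eq_true, if_false, pvRows]
  | case3 a b =>
    intro acc i hi
    obtain ⟨h0, h1, h2, h3⟩ := pvMod3_facts i hi
    simp only [List.foldl, h0, h1, Bool.false_eq_true, if_false, pvRows]
    simp [String.append_assoc]
  | case4 a b c rest ih =>
    intro acc i hi
    obtain ⟨h0, h1, h2, h3⟩ := pvMod3_facts i hi
    simp only [List.foldl]
    rw [show i + 1 + 1 = i + 2 by ring]
    simp only [h0, h1, h2, Bool.false_eq_true, if_false, if_true]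
    rw [ih _ (i + 2 + 1) (by rw [show i + 2 + 1 = i + 3 by ring]; exact h3)]
    simp [pvRows, String.append_assoc]

-- ===== VERDICT (by name: the statement is the Claim_ definition above) =====
theorem printListAsMatrix_spec : Claim_equal_printListAsMatrix := by
  intro lst flp _
  unfold Spec_printListAsMatrix printListAsMatrix printListAsMatrix_alt
  rw [pvFold_rows lst "" 1 (by decide)]
  simp
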